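-- pv_equiv track=rewrite | github.com/clara-upem/Chess | chess.py | mvt_t_v
-- ===== SOURCE A (Python) =====
-- def check_position_piece(x, y, joueur):
--     """
--     Permet de verifier si une piece est dans le set
--     :param x:int, index d'un tableau (lignes)
--     :param y:int, index du tableau (colonnes)
--     :param joueur: list, tableau de pieces d'un joueur
--     :return:True si il y a une pieces et False si il n'y en a pas
--
--     >>> check_position_piece(1,1,[['P', (1, 0)]])
--     False
--
--     >>> check_position_piece(1, 0, [['P', (1, 0)]])
--     True
--     """
--     for e in joueur:
--         if e[1] == (x, y):
--             return True
--     return False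
--
-- def mvt_t_v(x, y, joueur, adversaire):
--     """
--     Permet de définir tous les mouvements de la tour verticalement
--     :param x:int, index d'un tableau (lignes)
--     :param y:int, index d'un tableau (colonnes)
--     :param joueur: list, tableau pièces du joueur 1
--     :param adversaire: list, tableau pièces du second joueur
--     :return: return mvt_tour_temp, mange_tour_temp(list,list): permet d'obtenir
--     le tableau de déplacement possible et le tableau de pièces qui peuvent
--     etre mange.
--     """
--     mvt_tour_temp = []
--     mange_tour_temp = []
--     # Je regarde sur l'axe vertical
--     for i in range(8):
--         # On ne regarde pas notre position
--         if (x, y) != (i, y):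
--             # Regarde si je suis sur une piece de mon adversaire
--             if check_position_piece(i, y, adversaire):
--                 if i < x:
--                     mange_tour_temp = [(i, y)]
--                     # espace libre entre deux pieces a supprimer
--                     mvt_tour_temp = []
--                 # Si je suis à droite de la piece je stoppe ma recherche
--                 else:
--                     mange_tour_temp.append((i, y))
--                     break
--             # Regarde si je suis ne suis pas sur une de mes pieces
--             elif not check_position_piece(i, y, joueur):
--                 # Mouvement possible
--                 mvt_tour_temp.append((i, y))
--             # Je suis sur une de mes pieces à droite j'arrete
--             elif i > x:
--                 break
--             # Je suis sur une de mes piece à gauche je continu mais je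
--             # repars de zero
--             else:
--                 mange_tour_temp = []
--                 mvt_tour_temp = []
--     return mvt_tour_temp, mange_tour_temp
-- ===== SOURCE B (Python) =====
-- def mvt_t_v(x, y, joueur, adversaire):
--     adv = {p[1] for p in adversaire}
--     own = {p[1] for p in joueur}
--     down_free, down_cap = [], []
--     for i in range(min(7, x - 1), -1, -1):
--         sq = (i, y)
--         if sq in adv:
--             down_cap = [sq]
--             break
--         if sq in own:
--             break
--         down_free.append(sq)
--     up_free, up_cap = [], []
--     for i in range(max(0, x + 1), 8):
--         sq = (i, y)
--         if sq in adv: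
--             up_cap = [sq]
--             break
--         if sq in own:
--             break
--         up_free.append(sq)
--     return down_free[::-1] + up_free, down_cap + up_cap
-- ===== Notes on version B (the rewrite author's own statement) =====
-- stated objective: alternative
-- what changed: Replaces A's single 0..7 sweep with state resets (clearing mvt/mange when passing a blocker below x) by two independent directional ray scans from the rook with early break, using position sets built once instead of a linear check_position_piece scan per square.
import Mathlib
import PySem

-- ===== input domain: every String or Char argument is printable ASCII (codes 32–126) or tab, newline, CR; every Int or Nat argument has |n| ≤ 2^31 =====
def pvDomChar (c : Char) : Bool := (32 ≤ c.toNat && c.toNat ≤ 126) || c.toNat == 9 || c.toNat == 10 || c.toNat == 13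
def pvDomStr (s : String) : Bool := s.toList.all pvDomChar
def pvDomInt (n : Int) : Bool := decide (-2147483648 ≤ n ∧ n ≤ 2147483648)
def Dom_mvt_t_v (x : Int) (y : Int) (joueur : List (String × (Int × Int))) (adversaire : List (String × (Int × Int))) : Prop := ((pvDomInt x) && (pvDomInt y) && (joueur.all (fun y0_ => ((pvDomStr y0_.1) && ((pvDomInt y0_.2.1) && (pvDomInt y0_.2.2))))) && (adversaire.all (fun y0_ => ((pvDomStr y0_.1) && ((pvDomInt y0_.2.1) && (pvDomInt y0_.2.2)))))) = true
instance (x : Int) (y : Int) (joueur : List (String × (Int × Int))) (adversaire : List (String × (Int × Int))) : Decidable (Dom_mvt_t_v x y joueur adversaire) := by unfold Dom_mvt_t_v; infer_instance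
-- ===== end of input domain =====

-- ===== PORT A =====
-- B replaces A's single stateful 0..7 sweep by two directional ray scans over position sets (alternative decomposition; return value only).
def check_position_piece (x : Int) (y : Int) (joueur : List (String × (Int × Int))) : Bool :=
  match joueur with
  | [] => false
  | e :: rest => if e.2 = (x, y) then true else check_position_piece x y rest

def mvtLoopA (x : Int) (y : Int) (joueur : List (String × (Int × Int)))
    (adversaire : List (String × (Int × Int))) :
    List Int → List (Int × Int) → List (Int × Int) → (List (Int × Int)) × (List (Int × Int))
  | [], mvt, mange => (mvt, mange)
  | i :: rest, mvt, mange =>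
    if (x, y) ≠ (i, y) then
      if check_position_piece i y adversaire then
        if i < x then mvtLoopA x y joueur adversaire rest [] [(i, y)]
        else (mvt, mange ++ [(i, y)])
      else if ¬ check_position_piece i y joueur then
        mvtLoopA x y joueur adversaire rest (mvt ++ [(i, y)]) mange
      else if i > x then (mvt, mange)
      else mvtLoopA x y joueur adversaire rest [] []
    else mvtLoopA x y joueur adversaire rest mvt mange

def mvt_t_v (x : Int) (y : Int) (joueur : List (String × (Int × Int))) (adversaire : List (String × (Int × Int))) : (List (Int × Int)) × (List (Int × Int)) :=
  mvtLoopA x y joueur adversaire (PySem.List.pyRange 0 8 1) [] []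

-- ===== PORT B =====
-- one directional ray scan: collect free squares until the first blocker (adversary → capture)
def rayScan (y : Int) (adv own : PySem.Set (Int × Int)) :
    List Int → (List (Int × Int)) × (List (Int × Int))
  | [] => ([], [])
  | i :: rest =>
    if PySem.Set.contains adv (i, y) then ([], [(i, y)])
    else if PySem.Set.contains own (i, y) then ([], [])
    else
      let r := rayScan y adv own rest
      ((i, y) :: r.1, r.2)

def mvt_t_v_alt (x : Int) (y : Int) (joueur : List (String × (Int × Int))) (adversaire : List (String × (Int × Int))) : (List (Int × Int)) × (List (Int × Int)) :=
  let adv := PySem.Set.ofList (adversaire.map Prod.snd)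
  let own := PySem.Set.ofList (joueur.map Prod.snd)
  let down := rayScan y adv own (PySem.List.pyRange (min 7 (x - 1)) (-1) (-1))
  let up := rayScan y adv own (PySem.List.pyRange (max 0 (x + 1)) 8 1)
  (down.1.reverse ++ up.1, down.2 ++ up.2)

-- ===== PRECONDITION & SPEC =====
def Spec_mvt_t_v (x : Int) (y : Int) (joueur : List (String × (Int × Int))) (adversaire : List (String × (Int × Int))) (out : (List (Int × Int)) × (List (Int × Int))) : Prop := out = mvt_t_v_alt x y joueur adversaire
instance (x : Int) (y : Int) (joueur : List (String × (Int × Int))) (adversaire : List (String × (Int × Int))) (out : (List (Int × Int)) × (List (Int × Int))) : Decidable (Spec_mvt_t_v x y joueur adversaire out) := by unfold Spec_mvt_t_v; infer_instance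

-- ===== CLAIM (what is proved, stated in full; the proofs are below) =====
def Claim_equal_mvt_t_v : Prop := ∀ (x : Int) (y : Int) (joueur : List (String × (Int × Int))) (adversaire : List (String × (Int × Int))), Dom_mvt_t_v x y joueur adversaire → Spec_mvt_t_v x y joueur adversaire (mvt_t_v x y joueur adversaire)

-- ===== LEMMAS AND PROOFS =====

lemma check_eq_contains (x y : Int) (l : List (String × (Int × Int))) :
    check_position_piece x y l = PySem.Set.contains (PySem.Set.ofList (l.map Prod.snd)) (x, y) := by
  induction l with
  | nil => simp [check_position_piece, PySem.Set.contains]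
  | cons e rest ih =>
    simp only [check_position_piece]
    by_cases h : e.2 = (x, y) <;>
      simp [h, ih, PySem.Set.contains, PySem.Set.mem_ofList, eq_comm]

lemma up_seg (x y : Int) (j a : List (String × (Int × Int))) :
    ∀ (is : List Int) (mvt mange : List (Int × Int)), (∀ i ∈ is, x < i) →
      mvtLoopA x y j a is mvt mange =
        (mvt ++ (rayScan y (PySem.Set.ofList (a.map Prod.snd)) (PySem.Set.ofList (j.map Prod.snd)) is).1,
         mange ++ (rayScan y (PySem.Set.ofList (a.map Prod.snd)) (PySem.Set.ofList (j.map Prod.snd)) is).2) := by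
  intro is
  induction is with
  | nil => intro mvt mange _; simp [mvtLoopA, rayScan]
  | cons i rest ih =>
    intro mvt mange h
    have hxi : x < i := h i (List.mem_cons_self ..)
    have hne : ((x, y) : Int × Int) ≠ (i, y) := by
      intro hc; exact absurd (congrArg Prod.fst hc) (by simp; omega)
    rcases Bool.eq_false_or_eq_true (PySem.Set.contains (PySem.Set.ofList (a.map Prod.snd)) (i, y)) with ha | ha <;>
      rcases Bool.eq_false_or_eq_true (PySem.Set.contains (PySem.Set.ofList (j.map Prod.snd)) (i, y)) with ho | ho <;>
      simp only [mvtLoopA, if_pos hne, check_eq_contains, ha, ho, rayScan,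
        if_neg (by omega : ¬ i < x), if_pos (by omega : i > x), Bool.not_true, Bool.not_false,
        Bool.false_eq_true, eq_self_iff_true, if_true, if_false, ite_true, ite_false, reduceIte,
        not_true, not_false_iff, ih _ _ (fun i hi => h i (List.mem_cons_of_mem _ hi))] <;>
      simp

lemma rayScan_append (y : Int) (adv own : PySem.Set (Int × Int)) (l l' : List Int) :
    rayScan y adv own (l ++ l') =
      if l.all (fun i => !(PySem.Set.contains adv (i, y)) && !(PySem.Set.contains own (i, y))) then
        ((l.map (fun i => (i, y))) ++ (rayScan y adv own l').1, (rayScan y adv own l').2)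
      else rayScan y adv own l := by
  induction l with
  | nil => simp [rayScan]
  | cons i l ih =>
    rcases Bool.eq_false_or_eq_true (PySem.Set.contains adv (i, y)) with ha | ha <;>
      rcases Bool.eq_false_or_eq_true (PySem.Set.contains own (i, y)) with ho | ho <;>
      rcases Bool.eq_false_or_eq_true (l.all fun z => !(PySem.Set.contains adv (z, y)) && !(PySem.Set.contains own (z, y))) with hall | hall <;>
      simp only [List.cons_append, rayScan, List.all_cons, ha, ho, hall, ih, Bool.not_true,
        Bool.not_false, Bool.false_and, Bool.true_and, Bool.and_false, Bool.and_true, if_true,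
        if_false, ite_true, ite_false, reduceIte, List.map_cons, Bool.false_eq_true,
        eq_self_iff_true]

lemma down_seg (x y : Int) (j a : List (String × (Int × Int))) :
    ∀ (is rest : List Int) (mvt mange : List (Int × Int)), (∀ i ∈ is, i < x) →
      mvtLoopA x y j a (is ++ rest) mvt mange =
        (if is.all (fun i => !(PySem.Set.contains (PySem.Set.ofList (a.map Prod.snd)) (i, y)) &&
              !(PySem.Set.contains (PySem.Set.ofList (j.map Prod.snd)) (i, y))) then
          mvtLoopA x y j a rest (mvt ++ is.map (fun i => (i, y))) mange
        else
          mvtLoopA x y j a rest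
            ((rayScan y (PySem.Set.ofList (a.map Prod.snd)) (PySem.Set.ofList (j.map Prod.snd)) is.reverse).1.reverse)
            ((rayScan y (PySem.Set.ofList (a.map Prod.snd)) (PySem.Set.ofList (j.map Prod.snd)) is.reverse).2)) := by
  intro is
  induction is with
  | nil => intro rest mvt mange _; simp
  | cons i tl ih =>
    intro rest mvt mange h
    have hix : i < x := h i (List.mem_cons_self ..)
    have htl : ∀ i ∈ tl, i < x := fun i hi => h i (List.mem_cons_of_mem _ hi)
    have hne : ((x, y) : Int × Int) ≠ (i, y) := by
      intro hc; exact absurd (congrArg Prod.fst hc) (by simp; omega)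
    rcases Bool.eq_false_or_eq_true (PySem.Set.contains (PySem.Set.ofList (a.map Prod.snd)) (i, y)) with ha | ha <;>
      rcases Bool.eq_false_or_eq_true (PySem.Set.contains (PySem.Set.ofList (j.map Prod.snd)) (i, y)) with ho | ho <;>
      rcases Bool.eq_false_or_eq_true (tl.all fun z => !(PySem.Set.contains (PySem.Set.ofList (a.map Prod.snd)) (z, y)) && !(PySem.Set.contains (PySem.Set.ofList (j.map Prod.snd)) (z, y))) with hall | hall <;>
      simp only [List.cons_append, mvtLoopA, if_pos hne, check_eq_contains, ha, ho, hall,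
        if_pos hix, if_neg (by omega : ¬ i > x), List.all_cons, List.reverse_cons, rayScan_append, List.all_reverse,
        Bool.not_true, Bool.not_false, Bool.false_and, Bool.true_and, Bool.and_false,
        Bool.and_true, Bool.false_eq_true, eq_self_iff_true, if_true, if_false, ite_true,
        ite_false, reduceIte, not_true, not_false_iff, ih rest _ _ htl, rayScan,
        List.map_reverse, List.map_cons, List.reverse_reverse, List.append_nil,
        List.nil_append] <;>
      simp [List.append_assoc]

lemma rayScan_all_free (y : Int) (adv own : PySem.Set (Int × Int)) (l : List Int)
    (h : l.all (fun i => !(PySem.Set.contains adv (i, y)) && !(PySem.Set.contains own (i, y))) = true) :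
    rayScan y adv own l = (l.map (fun i => (i, y)), []) := by
  induction l with
  | nil => simp [rayScan]
  | cons i l ih =>
    simp only [List.all_cons, Bool.and_eq_true, Bool.not_eq_true'] at h
    obtain ⟨⟨ha, ho⟩, hall⟩ := h
    simp only [rayScan, ha, ho, Bool.false_eq_true, if_false, ite_false, reduceIte,
      ih hall, List.map_cons]

lemma down_seg' (x y : Int) (j a : List (String × (Int × Int)))
    (is rest : List Int) (h : ∀ i ∈ is, i < x) :
    mvtLoopA x y j a (is ++ rest) [] [] =
      mvtLoopA x y j a rest
        ((rayScan y (PySem.Set.ofList (a.map Prod.snd)) (PySem.Set.ofList (j.map Prod.snd)) is.reverse).1.reverse)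
        ((rayScan y (PySem.Set.ofList (a.map Prod.snd)) (PySem.Set.ofList (j.map Prod.snd)) is.reverse).2) := by
  rw [down_seg x y j a is rest [] [] h]
  rcases Bool.eq_false_or_eq_true (is.all fun z => !(PySem.Set.contains (PySem.Set.ofList (a.map Prod.snd)) (z, y)) && !(PySem.Set.contains (PySem.Set.ofList (j.map Prod.snd)) (z, y))) with hall | hall
  · rw [if_pos hall,
      rayScan_all_free _ _ _ _ (by rw [List.all_reverse]; exact hall)]
    simp [List.map_reverse]
  · rw [if_neg (fun hc => by rw [hall] at hc; exact Bool.false_ne_true hc)]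

lemma skip_step (x y : Int) (j a : List (String × (Int × Int))) (rest : List Int)
    (mvt mange : List (Int × Int)) :
    mvtLoopA x y j a (x :: rest) mvt mange = mvtLoopA x y j a rest mvt mange := by
  simp [mvtLoopA]

-- ===== VERDICT (by name: the statement is the Claim_ definition above) =====
theorem mvt_t_v_spec : Claim_equal_mvt_t_v := by
  intro x y j a _
  unfold Spec_mvt_t_v
  show mvt_t_v x y j a = mvt_t_v_alt x y j a
  simp only [mvt_t_v, mvt_t_v_alt]
  by_cases h8 : 8 ≤ x
  · -- rook above the board: the whole sweep is a "down" segment, the up ray is empty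
    rw [min_eq_left (by omega), max_eq_right (by omega),
      PySem.List.pyRange_one_eq_nil (by omega : (8:Int) ≤ x + 1),
      show PySem.List.pyRange 7 (-1) (-1) = (PySem.List.pyRange 0 8 1).reverse from by decide,
      ← List.append_nil (PySem.List.pyRange 0 8 1),
      down_seg' x y j a _ _ (by intro i hi; rw [PySem.List.mem_pyRange_one] at hi; omega)]
    simp [mvtLoopA, rayScan]
  · by_cases h0 : x < 0
    · -- rook below the board: the whole sweep is an "up" segment, the down ray is empty
      rw [min_eq_right (by omega), max_eq_left (by omega),
        PySem.List.pyRange_neg_one_eq_nil (by omega : x - 1 ≤ -1),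
        up_seg x y j a _ _ _ (by intro i hi; rw [PySem.List.mem_pyRange_one] at hi; omega)]
      simp [rayScan]
    · -- rook on the board: down ray, skipped own square, up ray
      rw [min_eq_right (by omega), max_eq_right (by omega),
        PySem.List.pyRange_one_append 0 x 8 (by omega) (by omega),
        PySem.List.pyRange_one_cons (by omega : x < 8),
        down_seg' x y j a _ _ (by intro i hi; rw [PySem.List.mem_pyRange_one] at hi; omega),
        skip_step,
        up_seg x y j a _ _ _ (by intro i hi; rw [PySem.List.mem_pyRange_one] at hi; omega),
        show PySem.List.pyRange (x - 1) (-1) (-1) = (PySem.List.pyRange 0 x 1).reverse from by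
          rw [PySem.List.pyRange_neg_one_eq_reverse]; norm_num]
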